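-- pv_equiv track=rewrite | github.com/Animesh6096/CSE221 | Lab7/task2.py | maximize_tasks
-- ===== SOURCE A (Python) =====
-- def maximize_tasks(task_list, num_resources):
--     task_list.sort(key=lambda x: x[1])
--
--     selected_tasks = [[] for _ in range(num_resources)]
--
--     for task in task_list:
--         for resource in range(num_resources):
--             start_time, end_time = task
--
--             if not selected_tasks[resource] or start_time >= selected_tasks[resource][-1][1]:
--                 selected_tasks[resource].append((start_time, end_time))
--                 break
--
--     return sum(len(task) for task in selected_tasks)
-- ===== SOURCE B (Python) =====
-- # Segment tree over the first min(n, m) resource slots: each leaf holds the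
-- # slot's last end time (_FREE for an unused slot), internal nodes hold the
-- # subtree minimum, so the leftmost available slot is found by a log-time
-- # descent instead of a linear scan.
--
-- _FREE = -(1 << 62)  # below every admissible time, marks an unused slot
--
--
-- def _build(k):
--     # complete tree with k leaves; leaf = [value], node = [min, left_size, left, right]
--     if k == 1:
--         return [_FREE]
--     half = (k + 1) // 2
--     return [_FREE, half, _build(half), _build(k - half)]
--
--
-- def _query(node, s):
--     # leftmost leaf index whose value is <= s; caller guarantees node[0] <= s
--     if len(node) == 1:
--         return 0
--     if node[2][0] <= s:
--         return _query(node[2], s)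
--     return node[1] + _query(node[3], s)
--
--
-- def _update(node, i, v):
--     if len(node) == 1:
--         node[0] = v
--         return
--     if i < node[1]:
--         _update(node[2], i, v)
--     else:
--         _update(node[3], i - node[1], v)
--     node[0] = min(node[2][0], node[3][0])
--
--
-- def maximize_tasks(task_list, num_resources):
--     task_list.sort(key=lambda x: x[1])
--     k = min(len(task_list), num_resources)
--     if k <= 0:
--         return 0
--     tree = _build(k)
--     count = 0
--     for start_time, end_time in task_list:
--         if tree[0] <= start_time:
--             _update(tree, _query(tree, start_time), end_time)
--             count += 1
--     return count
-- ===== Notes on version B (the rewrite author's own statement) =====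
-- stated objective: faster
-- what changed: Replaces A's per-task linear first-fit scan over all num_resources lists of tasks by a min-segment tree of last end times over only the first min(n, num_resources) resource slots, finding the leftmost available slot by a logarithmic descent and keeping a running count instead of summing list lengths.
import Mathlib
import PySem

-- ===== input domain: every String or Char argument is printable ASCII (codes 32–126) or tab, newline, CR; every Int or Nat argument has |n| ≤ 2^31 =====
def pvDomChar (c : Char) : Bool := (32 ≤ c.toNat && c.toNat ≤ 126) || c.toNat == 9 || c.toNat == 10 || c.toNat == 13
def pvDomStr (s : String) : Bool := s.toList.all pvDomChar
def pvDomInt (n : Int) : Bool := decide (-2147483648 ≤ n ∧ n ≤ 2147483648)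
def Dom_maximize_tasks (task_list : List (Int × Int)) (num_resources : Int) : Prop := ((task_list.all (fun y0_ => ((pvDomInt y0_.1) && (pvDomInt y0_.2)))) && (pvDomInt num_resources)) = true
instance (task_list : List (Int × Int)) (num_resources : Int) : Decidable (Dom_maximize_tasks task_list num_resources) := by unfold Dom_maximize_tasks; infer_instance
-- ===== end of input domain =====

-- B replaces A's linear first-fit scan over all resources by a segment tree of
-- last end times over the first min(n, m) resource slots (leftmost-available
-- query + point update). Both A and B sort task_list in place (Python side);
-- the equivalence proved here is about the return value.

-- ===== PORT A =====
-- inner 'for resource in range(num_resources): … break' of A, as structural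
-- recursion over the resource list (condition: empty, or start ≥ last end)
def pvInnerA (s e : Int) : List (List (Int × Int)) → List (List (Int × Int))
  | [] => []
  | l :: rest =>
    match l.getLast? with
    | none => (l ++ [(s, e)]) :: rest
    | some p => if s ≥ p.2 then (l ++ [(s, e)]) :: rest else l :: pvInnerA s e rest

def maximize_tasks (task_list : List (Int × Int)) (num_resources : Int) : Int :=
  let sortedTasks := PySem.List.sorted task_list (fun x => x.2) false
  let init : List (List (Int × Int)) :=
    (PySem.List.pyRange 0 num_resources 1).map (fun _ => ([] : List (Int × Int)))
  let fin := sortedTasks.foldl (fun acc t => pvInnerA t.1 t.2 acc) init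
  fin.foldl (fun a l => a + PySem.List.len l) 0

-- ===== PORT B =====
def pvFREE : Int := -(2 ^ 62)

-- leaf v = [v]; node mn lsz l r = [mn, lsz, l, r] of Source B
inductive pvSeg where
  | leaf (v : Int)
  | node (mn : Int) (lsz : Nat) (l r : pvSeg)
deriving Repr

def pvSegMin : pvSeg → Int
  | .leaf v => v
  | .node mn _ _ _ => mn

def pvBuild (k : Nat) : pvSeg :=
  if k ≤ 1 then .leaf pvFREE
  else .node pvFREE ((k + 1) / 2) (pvBuild ((k + 1) / 2)) (pvBuild (k - (k + 1) / 2))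
  termination_by k
  decreasing_by all_goals omega

def pvQuery : pvSeg → Int → Nat
  | .leaf _, _ => 0
  | .node _ lsz l r, s => if pvSegMin l ≤ s then pvQuery l s else lsz + pvQuery r s

def pvUpdate : pvSeg → Nat → Int → pvSeg
  | .leaf _, _, v => .leaf v
  | .node _ lsz l r, i, v =>
    if i < lsz then
      let l' := pvUpdate l i v
      .node (min (pvSegMin l') (pvSegMin r)) lsz l' r
    else
      let r' := pvUpdate r (i - lsz) v
      .node (min (pvSegMin l) (pvSegMin r')) lsz l r'

def maximize_tasks_alt (task_list : List (Int × Int)) (num_resources : Int) : Int :=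
  let sortedTasks := PySem.List.sorted task_list (fun x => x.2) false
  let k : Int := min (PySem.List.len task_list) num_resources
  if k ≤ 0 then 0
  else
    (sortedTasks.foldl
      (fun (p : pvSeg × Int) t =>
        if pvSegMin p.1 ≤ t.1 then (pvUpdate p.1 (pvQuery p.1 t.1) t.2, p.2 + 1) else p)
      (pvBuild k.toNat, 0)).2

-- ===== PRECONDITION & SPEC =====
def Spec_maximize_tasks (task_list : List (Int × Int)) (num_resources : Int) (out : Int) : Prop := out = maximize_tasks_alt task_list num_resources
instance (task_list : List (Int × Int)) (num_resources : Int) (out : Int) : Decidable (Spec_maximize_tasks task_list num_resources out) := by unfold Spec_maximize_tasks; infer_instance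

-- ===== CLAIM (what is proved, stated in full; the proofs are below) =====
def Claim_equal_maximize_tasks : Prop := ∀ (task_list : List (Int × Int)) (num_resources : Int), Dom_maximize_tasks task_list num_resources → Spec_maximize_tasks task_list num_resources (maximize_tasks task_list num_resources)

-- ===== LEMMAS AND PROOFS =====

-- abstraction: a resource list is abstracted to its last end time (pvFREE if unused)
def pvEndOf (l : List (Int × Int)) : Int :=
  match l.getLast? with
  | none => pvFREE
  | some p => p.2

def pvEnds (st : List (List (Int × Int))) : List Int := st.map pvEndOf

def pvSumLen (st : List (List (Int × Int))) (a : Int) : Int :=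
  st.foldl (fun a l => a + PySem.List.len l) a

-- abstract first-fit on the ends list
def pvFF (s e : Int) : List Int → List Int
  | [] => []
  | t :: rest => if t ≤ s then e :: rest else t :: pvFF s e rest

def pvAbs (ts : List (Int × Int)) (E : List Int) (c : Int) : List Int × Int :=
  ts.foldl
    (fun p t =>
      (pvFF t.1 t.2 p.1, if p.1.any (fun x => decide (x ≤ t.1)) then p.2 + 1 else p.2))
    (E, c)

def pvTreeList : pvSeg → List Int
  | .leaf v => [v]
  | .node _ _ l r => pvTreeList l ++ pvTreeList r

def pvWf : pvSeg → Prop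
  | .leaf _ => True
  | .node mn lsz l r =>
      mn = min (pvSegMin l) (pvSegMin r) ∧ lsz = (pvTreeList l).length ∧ pvWf l ∧ pvWf r

theorem pvTreeList_ne_nil : ∀ t : pvSeg, pvTreeList t ≠ []
  | .leaf v => by simp [pvTreeList]
  | .node mn lsz l r => by
      simp only [pvTreeList, ne_eq, List.append_eq_nil_iff, not_and]
      intro h
      exact absurd h (pvTreeList_ne_nil l)

theorem pvSegMin_mem : ∀ t : pvSeg, pvWf t → pvSegMin t ∈ pvTreeList t
  | .leaf v, _ => by simp [pvTreeList, pvSegMin]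
  | .node mn lsz l r, hw => by
      obtain ⟨hm, _, hl, hr⟩ := hw
      simp only [pvTreeList, pvSegMin, List.mem_append]
      rcases le_total (pvSegMin l) (pvSegMin r) with h | h
      · left; rw [hm, min_eq_left h]; exact pvSegMin_mem l hl
      · right; rw [hm, min_eq_right h]; exact pvSegMin_mem r hr

theorem pvSegMin_le : ∀ t : pvSeg, pvWf t → ∀ x ∈ pvTreeList t, pvSegMin t ≤ x
  | .leaf v, _ => by simp [pvTreeList, pvSegMin]
  | .node mn lsz l r, hw => by
      obtain ⟨hm, _, hl, hr⟩ := hw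
      intro x hx
      simp only [pvTreeList, List.mem_append] at hx
      rcases hx with hx | hx
      · exact le_trans (hm ▸ min_le_left _ _) (pvSegMin_le l hl x hx)
      · exact le_trans (hm ▸ min_le_right _ _) (pvSegMin_le r hr x hx)

theorem pvSegMin_le_iff (t : pvSeg) (hw : pvWf t) (s : Int) :
    pvSegMin t ≤ s ↔ ∃ x ∈ pvTreeList t, x ≤ s := by
  constructor
  · intro h; exact ⟨pvSegMin t, pvSegMin_mem t hw, h⟩
  · rintro ⟨x, hx, hxs⟩; exact le_trans (pvSegMin_le t hw x hx) hxs

theorem pvLength_update : ∀ (t : pvSeg) (i : Nat) (v : Int),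
    (pvTreeList (pvUpdate t i v)).length = (pvTreeList t).length
  | .leaf w, i, v => by simp [pvUpdate, pvTreeList]
  | .node mn lsz l r, i, v => by
      by_cases h : i < lsz
      · simp [pvUpdate, if_pos h, pvTreeList, pvLength_update l i v]
      · simp [pvUpdate, if_neg h, pvTreeList, pvLength_update r (i - lsz) v]

theorem pvWf_update : ∀ (t : pvSeg) (i : Nat) (v : Int), pvWf t → pvWf (pvUpdate t i v)
  | .leaf w, _, v, _ => trivial
  | .node mn lsz l r, i, v, hw => by
      obtain ⟨hm, hsz, hl, hr⟩ := hw
      by_cases h : i < lsz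
      · simp only [pvUpdate, if_pos h]
        exact ⟨rfl, by rw [pvLength_update]; exact hsz, pvWf_update l i v hl, hr⟩
      · simp only [pvUpdate, if_neg h]
        exact ⟨rfl, hsz, hl, pvWf_update r (i - lsz) v hr⟩

theorem pvQuery_lt : ∀ (t : pvSeg) (s : Int), pvWf t → pvSegMin t ≤ s →
    pvQuery t s < (pvTreeList t).length
  | .leaf v, s, _, _ => by simp [pvQuery, pvTreeList]
  | .node mn lsz l r, s, hw, hm => by
      obtain ⟨hmn, hsz, hl, hr⟩ := hw
      by_cases h : pvSegMin l ≤ s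
      · have := pvQuery_lt l s hl h
        simp only [pvQuery, if_pos h, pvTreeList, List.length_append]
        omega
      · have hrm : pvSegMin r ≤ s := by
          rcases min_le_iff.mp (hmn ▸ hm) with h' | h'
          · exact absurd h' h
          · exact h'
        have := pvQuery_lt r s hr hrm
        simp only [pvQuery, if_neg h, pvTreeList, List.length_append]
        omega

theorem pvFF_append_left (s e : Int) (L R : List Int) (h : ∃ x ∈ L, x ≤ s) :
    pvFF s e (L ++ R) = pvFF s e L ++ R := by
  induction L with
  | nil => simp at h
  | cons t rest ih =>
    by_cases ht : t ≤ s
    · simp [pvFF, ht]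
    · obtain ⟨x, hx, hxs⟩ := h
      rcases List.mem_cons.mp hx with rfl | hx'
      · exact absurd hxs ht
      · simp [pvFF, ht, ih ⟨x, hx', hxs⟩]

theorem pvFF_append_right (s e : Int) (L R : List Int) (h : ∀ x ∈ L, ¬ x ≤ s) :
    pvFF s e (L ++ R) = L ++ pvFF s e R := by
  induction L with
  | nil => simp
  | cons t rest ih =>
    have ht : ¬ t ≤ s := h t (by simp)
    simp [pvFF, ht, ih (fun x hx => h x (by simp [hx]))]

theorem pvFF_id (s e : Int) (L : List Int) (h : ∀ x ∈ L, ¬ x ≤ s) :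
    pvFF s e L = L := by
  have := pvFF_append_right s e L [] h
  simpa [pvFF] using this

theorem pvMem_of_mem_FF (s e x : Int) (L : List Int) (hx : x ∈ pvFF s e L) :
    x ∈ L ∨ x = e := by
  induction L with
  | nil => simp [pvFF] at hx
  | cons t rest ih =>
    by_cases ht : t ≤ s
    · simp only [pvFF, if_pos ht, List.mem_cons] at hx
      rcases hx with h | h
      · right; exact h
      · left; simp [h]
    · simp only [pvFF, if_neg ht, List.mem_cons] at hx
      rcases hx with h | h
      · left; simp [h]
      · rcases ih h with h' | h'
        · left; simp [h']
        · right; exact h'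

-- the update at the queried index realizes abstract first-fit
theorem pvUpdate_query : ∀ (t : pvSeg) (s e : Int), pvWf t → pvSegMin t ≤ s →
    pvTreeList (pvUpdate t (pvQuery t s) e) = pvFF s e (pvTreeList t)
  | .leaf v, s, e, _, hm => by
      have hv : v ≤ s := by simpa [pvSegMin] using hm
      simp [pvQuery, pvUpdate, pvTreeList, pvFF, hv]
  | .node mn lsz l r, s, e, hw, hm => by
      obtain ⟨hmn, hsz, hl, hr⟩ := hw
      by_cases h : pvSegMin l ≤ s
      · have hq : pvQuery l s < lsz := hsz ▸ pvQuery_lt l s hl h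
        simp only [pvQuery, if_pos h, pvUpdate, if_pos hq, pvTreeList]
        rw [pvUpdate_query l s e hl h,
          pvFF_append_left s e _ _ ((pvSegMin_le_iff l hl s).mp h)]
      · have hrm : pvSegMin r ≤ s := by
          rcases min_le_iff.mp (hmn ▸ hm) with h' | h'
          · exact absurd h' h
          · exact h'
        have hno : ∀ x ∈ pvTreeList l, ¬ x ≤ s := by
          intro x hx hxs
          exact h ((pvSegMin_le_iff l hl s).mpr ⟨x, hx, hxs⟩)
        have hnq : ¬ lsz + pvQuery r s < lsz := by omega
        simp only [pvQuery, if_neg h, pvUpdate, if_neg hnq, pvTreeList,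
          Nat.add_sub_cancel_left]
        rw [pvUpdate_query r s e hr hrm, pvFF_append_right s e _ _ hno]

theorem pvBuild_spec (k : Nat) (hk : 1 ≤ k) :
    pvWf (pvBuild k) ∧ pvTreeList (pvBuild k) = List.replicate k pvFREE := by
  induction k using Nat.strong_induction_on with
  | _ k ih =>
    by_cases h : k ≤ 1
    · have hk1 : k = 1 := by omega
      subst hk1
      rw [pvBuild]
      simp [pvWf, pvTreeList, List.replicate]
    · have hl := ih ((k + 1) / 2) (by omega) (by omega)
      have hr := ih (k - (k + 1) / 2) (by omega) (by omega)
      rw [pvBuild, if_neg h]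
      refine ⟨⟨?_, ?_, hl.1, hr.1⟩, ?_⟩
      · have hml : pvSegMin (pvBuild ((k + 1) / 2)) = pvFREE :=
          List.eq_of_mem_replicate (hl.2 ▸ pvSegMin_mem _ hl.1)
        have hmr : pvSegMin (pvBuild (k - (k + 1) / 2)) = pvFREE :=
          List.eq_of_mem_replicate (hr.2 ▸ pvSegMin_mem _ hr.1)
        show pvFREE = min (pvSegMin (pvBuild ((k + 1) / 2))) (pvSegMin (pvBuild (k - (k + 1) / 2)))
        rw [hml, hmr]; simp
      · rw [hl.2]; simp
      · simp only [pvTreeList, hl.2, hr.2]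
        rw [← List.replicate_add]
        congr 1
        omega

-- ==== A-side abstraction lemmas ====

theorem pvFREE_lt_of_dom (n : Int) (h : pvDomInt n = true) : pvFREE < n := by
  simp only [pvDomInt, decide_eq_true_eq] at h
  simp only [pvFREE]
  omega

theorem pvEnds_inner (s e : Int) (st : List (List (Int × Int))) (hs : pvFREE ≤ s) :
    pvEnds (pvInnerA s e st) = pvFF s e (pvEnds st) := by
  induction st with
  | nil => simp [pvInnerA, pvEnds, pvFF]
  | cons l rest ih =>
    rcases hlast : l.getLast? with _ | p
    · have he : pvEndOf l = pvFREE := by simp [pvEndOf, hlast]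
      simp [pvInnerA, hlast, pvEnds, pvFF, pvEndOf, he, hs]
    · by_cases hcond : s ≥ p.2
      · have he : pvEndOf l = p.2 := by simp [pvEndOf, hlast]
        simp [pvInnerA, hlast, hcond, pvEnds, pvFF, pvEndOf, he]
      · have he : pvEndOf l = p.2 := by simp [pvEndOf, hlast]
        have : ¬ pvEndOf l ≤ s := by rw [he]; omega
        simp only [pvInnerA, hlast, if_neg hcond, pvEnds, List.map_cons, pvFF,
          this, if_neg]
        exact congrArg _ ih

theorem pvSumLen_shift (st : List (List (Int × Int))) :
    ∀ (a d : Int), pvSumLen st (a + d) = pvSumLen st a + d := by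
  induction st with
  | nil => intro a d; simp [pvSumLen]
  | cons l rest ih =>
    intro a d
    simp only [pvSumLen, List.foldl_cons] at *
    rw [show a + d + PySem.List.len l = a + PySem.List.len l + d by ring]
    exact ih _ d

theorem pvSumLen_cons (l : List (Int × Int)) (rest : List (List (Int × Int))) (a : Int) :
    pvSumLen (l :: rest) a = pvSumLen rest a + l.length := by
  have h1 : pvSumLen (l :: rest) a = pvSumLen rest (a + PySem.List.len l) := rfl
  rw [h1, pvSumLen_shift rest a (PySem.List.len l)]
  simp [PySem.List.len_eq]

theorem pvSumLen_inner (s e : Int) (st : List (List (Int × Int))) (a : Int)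
    (hs : pvFREE ≤ s) :
    pvSumLen (pvInnerA s e st) a =
      pvSumLen st a + (if (pvEnds st).any (fun x => decide (x ≤ s)) then 1 else 0) := by
  induction st generalizing a with
  | nil => simp [pvInnerA, pvSumLen, pvEnds]
  | cons l rest ih =>
    rcases hlast : l.getLast? with _ | p
    · have hnil : l = [] := by simpa using hlast
      subst hnil
      have hstep : pvInnerA s e ([] :: rest) = [(s, e)] :: rest := by simp [pvInnerA]
      rw [hstep, pvSumLen_cons, pvSumLen_cons]
      have hany : ((pvEnds ([] :: rest)).any (fun x => decide (x ≤ s))) = true := by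
        simp [pvEnds, pvEndOf]
        left; exact hs
      rw [if_pos hany]
      simp
    · have he : pvEndOf l = p.2 := by simp [pvEndOf, hlast]
      by_cases hcond : s ≥ p.2
      · have hstep : pvInnerA s e (l :: rest) = (l ++ [(s, e)]) :: rest := by
          simp [pvInnerA, hlast, hcond]
        rw [hstep, pvSumLen_cons, pvSumLen_cons]
        have hany : ((pvEnds (l :: rest)).any (fun x => decide (x ≤ s))) = true := by
          simp [pvEnds, he]
          left; exact hcond
        rw [if_pos hany]
        simp
        ring
      · have hstep : pvInnerA s e (l :: rest) = l :: pvInnerA s e rest := by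
          simp [pvInnerA, hlast, hcond]
        rw [hstep, pvSumLen_cons, pvSumLen_cons, ih]
        have : (decide (p.2 ≤ s)) = false := by simpa using hcond
        simp only [pvEnds, List.map_cons, List.any_cons, he, this, Bool.false_or]
        ring

theorem pvA_abs (ts : List (Int × Int)) :
    ∀ (st : List (List (Int × Int))) (c a : Int),
      (∀ t ∈ ts, pvFREE ≤ t.1) →
      pvEnds (ts.foldl (fun acc t => pvInnerA t.1 t.2 acc) st) = (pvAbs ts (pvEnds st) c).1 ∧
      pvSumLen (ts.foldl (fun acc t => pvInnerA t.1 t.2 acc) st) a =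
        pvSumLen st a + ((pvAbs ts (pvEnds st) c).2 - c) := by
  induction ts with
  | nil => intro st c a _; simp [pvAbs]
  | cons t rest ih =>
    intro st c a hb
    have hs : pvFREE ≤ t.1 := hb t (by simp)
    have hb' : ∀ u ∈ rest, pvFREE ≤ u.1 := fun u hu => hb u (by simp [hu])
    by_cases h : (pvEnds st).any (fun x => decide (x ≤ t.1))
    · have ihx := ih (pvInnerA t.1 t.2 st) (c + 1) a hb'
      rw [pvEnds_inner t.1 t.2 st hs] at ihx
      simp only [List.foldl_cons, pvAbs] at ihx ⊢
      rw [if_pos h]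
      refine ⟨ihx.1, ?_⟩
      rw [ihx.2, pvSumLen_inner t.1 t.2 st a hs, if_pos h]
      ring
    · have ihx := ih (pvInnerA t.1 t.2 st) c a hb'
      rw [pvEnds_inner t.1 t.2 st hs] at ihx
      simp only [List.foldl_cons, pvAbs] at ihx ⊢
      rw [if_neg h]
      refine ⟨ihx.1, ?_⟩
      rw [ihx.2, pvSumLen_inner t.1 t.2 st a hs, if_neg h]
      ring

-- ==== B-side loop lemma ====

theorem pvB_abs (ts : List (Int × Int)) :
    ∀ (t : pvSeg) (c : Int), pvWf t →
      pvWf (ts.foldl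
        (fun p u =>
          if pvSegMin p.1 ≤ u.1 then (pvUpdate p.1 (pvQuery p.1 u.1) u.2, p.2 + 1) else p)
        (t, c)).1 ∧
      pvTreeList (ts.foldl
        (fun p u =>
          if pvSegMin p.1 ≤ u.1 then (pvUpdate p.1 (pvQuery p.1 u.1) u.2, p.2 + 1) else p)
        (t, c)).1 = (pvAbs ts (pvTreeList t) c).1 ∧
      (ts.foldl
        (fun p u =>
          if pvSegMin p.1 ≤ u.1 then (pvUpdate p.1 (pvQuery p.1 u.1) u.2, p.2 + 1) else p)
        (t, c)).2 = (pvAbs ts (pvTreeList t) c).2 := by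
  induction ts with
  | nil => intro t c hw; exact ⟨hw, rfl, rfl⟩
  | cons u rest ih =>
    intro t c hw
    have hiff : (pvSegMin t ≤ u.1) ↔
        ((pvTreeList t).any (fun x => decide (x ≤ u.1)) = true) := by
      rw [pvSegMin_le_iff t hw u.1]
      simp
    by_cases h : pvSegMin t ≤ u.1
    · have hany : (pvTreeList t).any (fun x => decide (x ≤ u.1)) = true := hiff.mp h
      have hw' := pvWf_update t (pvQuery t u.1) u.2 hw
      have ihx := ih (pvUpdate t (pvQuery t u.1) u.2) (c + 1) hw'
      rw [pvUpdate_query t u.1 u.2 hw h] at ihx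
      simp only [List.foldl_cons, pvAbs] at ihx ⊢
      rw [if_pos h, if_pos hany]
      exact ihx
    · have hany : ¬ (pvTreeList t).any (fun x => decide (x ≤ u.1)) = true :=
        fun hc => h (hiff.mpr hc)
      have hff : pvFF u.1 u.2 (pvTreeList t) = pvTreeList t := by
        apply pvFF_id
        intro x hx hxs
        exact h ((pvSegMin_le_iff t hw u.1).mpr ⟨x, hx, hxs⟩)
      have ihx := ih t c hw
      simp only [List.foldl_cons, pvAbs] at ihx ⊢
      rw [if_neg h, if_neg hany, hff]
      exact ihx

-- ==== truncation: extra always-free slots beyond the number of tasks do not matter ====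

theorem pvTrunc (ts : List (Int × Int)) :
    ∀ (u : List Int) (r₁ r₂ : Nat) (c : Int),
      (∀ t ∈ ts, pvFREE < t.1 ∧ pvFREE < t.2) →
      (∀ x ∈ u, pvFREE < x) →
      ts.length ≤ r₁ → ts.length ≤ r₂ →
      (pvAbs ts (u ++ List.replicate r₁ pvFREE) c).2 =
        (pvAbs ts (u ++ List.replicate r₂ pvFREE) c).2 := by
  induction ts with
  | nil => intro u r₁ r₂ c _ _ _ _; simp [pvAbs]
  | cons t rest ih =>
    intro u r₁ r₂ c hb hu h1 h2
    simp only [List.length_cons] at h1 h2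
    obtain ⟨hs, he⟩ := hb t (by simp)
    have hb' : ∀ x ∈ rest, pvFREE < x.1 ∧ pvFREE < x.2 := fun x hx => hb x (by simp [hx])
    have hr1 : 1 ≤ r₁ := by omega
    have hr2 : 1 ≤ r₂ := by omega
    have hany : ∀ r : Nat, 1 ≤ r →
        ((u ++ List.replicate r pvFREE).any (fun x => decide (x ≤ t.1))) = true := by
      intro r hr
      simp only [List.any_append, Bool.or_eq_true, List.any_eq_true]
      right
      exact ⟨pvFREE, List.mem_replicate.mpr ⟨by omega, rfl⟩, by simp; omega⟩
    by_cases hav : ∃ x ∈ u, x ≤ t.1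
    · have hstep : ∀ r : Nat, pvFF t.1 t.2 (u ++ List.replicate r pvFREE) =
          pvFF t.1 t.2 u ++ List.replicate r pvFREE := fun r =>
        pvFF_append_left t.1 t.2 u _ hav
      have hu' : ∀ x ∈ pvFF t.1 t.2 u, pvFREE < x := by
        intro x hx
        rcases pvMem_of_mem_FF t.1 t.2 x u hx with h' | h'
        · exact hu x h'
        · omega
      simp only [pvAbs, List.foldl_cons, hany r₁ hr1, hany r₂ hr2, if_true, hstep]
      exact ih (pvFF t.1 t.2 u) r₁ r₂ (c + 1) hb' hu' (by omega) (by omega)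
    · have hnav : ∀ x ∈ u, ¬ x ≤ t.1 := by
        intro x hx hxs; exact hav ⟨x, hx, hxs⟩
      have hstep : ∀ r : Nat, 1 ≤ r → pvFF t.1 t.2 (u ++ List.replicate r pvFREE) =
          (u ++ [t.2]) ++ List.replicate (r - 1) pvFREE := by
        intro r hr
        rw [pvFF_append_right t.1 t.2 u _ hnav]
        have : List.replicate r pvFREE = pvFREE :: List.replicate (r - 1) pvFREE := by
          cases r with
          | zero => omega
          | succ n => simp [List.replicate_succ]
        rw [this]
        simp [pvFF, (by omega : pvFREE ≤ t.1)]
      have hu' : ∀ x ∈ u ++ [t.2], pvFREE < x := by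
        intro x hx
        rcases List.mem_append.mp hx with h' | h'
        · exact hu x h'
        · simp at h'; omega
      simp only [pvAbs, List.foldl_cons, hany r₁ hr1, hany r₂ hr2, if_true,
        hstep r₁ hr1, hstep r₂ hr2]
      exact ih (u ++ [t.2]) (r₁ - 1) (r₂ - 1) (c + 1) hb' hu' (by omega) (by omega)

-- small facts about A's initial state
theorem pvEnds_init (xs : List Int) :
    pvEnds (xs.map (fun _ => ([] : List (Int × Int)))) = List.replicate xs.length pvFREE := by
  induction xs with
  | nil => simp [pvEnds]
  | cons x rest ih =>
    simp only [pvEnds, List.map_cons, List.length_cons, List.replicate_succ] at ih ⊢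
    rw [show pvEndOf [] = pvFREE from rfl]
    exact congrArg _ ih

theorem pvSumLen_init (xs : List Int) (a : Int) :
    pvSumLen (xs.map (fun _ => ([] : List (Int × Int)))) a = a := by
  induction xs generalizing a with
  | nil => simp [pvSumLen]
  | cons x rest ih => simpa [pvSumLen, PySem.List.len] using ih a

theorem pvAbs_nil_env (ts : List (Int × Int)) : ∀ c, pvAbs ts [] c = ([], c) := by
  induction ts with
  | nil => intro c; simp [pvAbs]
  | cons t rest ih =>
    intro c
    simp only [pvAbs, List.foldl_cons] at *
    simpa [pvFF] using ih c

theorem pvLen_pyRange (m : Int) : (PySem.List.pyRange 0 m 1).length = m.toNat := by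
  by_cases h : 0 ≤ m
  · obtain ⟨n, rfl⟩ := Int.eq_ofNat_of_zero_le h
    rw [PySem.List.pyRange_zero_natCast]
    simp
  · have hnil : PySem.List.pyRange 0 m 1 = [] := by
      apply List.eq_nil_iff_forall_not_mem.mpr
      intro x hx
      rw [PySem.List.mem_pyRange_one] at hx
      omega
    rw [hnil]
    simp
    omega

-- ===== VERDICT (by name: the statement is the Claim_ definition above) =====
theorem maximize_tasks_spec : Claim_equal_maximize_tasks := by
  intro tl m hdom
  unfold Spec_maximize_tasks
  unfold Dom_maximize_tasks at hdom
  rw [Bool.and_eq_true] at hdom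
  obtain ⟨hall, hmdom⟩ := hdom
  rw [List.all_eq_true] at hall
  have hts : ∀ t ∈ tl, pvFREE < t.1 ∧ pvFREE < t.2 := by
    intro t ht
    have := hall t ht
    rw [Bool.and_eq_true] at this
    exact ⟨pvFREE_lt_of_dom _ this.1, pvFREE_lt_of_dom _ this.2⟩
  have hsts : ∀ t ∈ PySem.List.sorted tl (fun x => x.2) false,
      pvFREE < t.1 ∧ pvFREE < t.2 := fun t ht =>
    hts t ((PySem.List.mem_sorted tl _ false t).mp ht)
  have hlen_st : (PySem.List.sorted tl (fun x => x.2) false).length = tl.length :=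
    PySem.List.length_sorted tl _ false
  -- A's value equals the abstract count on m.toNat free slots
  have hA := pvA_abs (PySem.List.sorted tl (fun x => x.2) false)
      ((PySem.List.pyRange 0 m 1).map (fun _ => ([] : List (Int × Int)))) 0 0
      (fun t ht => le_of_lt (hsts t ht).1)
  rw [pvEnds_init, pvSumLen_init, pvLen_pyRange] at hA
  have hAval : maximize_tasks tl m =
      (pvAbs (PySem.List.sorted tl (fun x => x.2) false)
        (List.replicate m.toNat pvFREE) 0).2 := by
    show pvSumLen ((PySem.List.sorted tl (fun x => x.2) false).foldl
        (fun acc t => pvInnerA t.1 t.2 acc)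
        ((PySem.List.pyRange 0 m 1).map (fun _ => ([] : List (Int × Int))))) 0 = _
    rw [hA.2]
    ring
  rw [hAval]
  by_cases hk : (min (PySem.List.len tl) m) ≤ 0
  · -- B returns 0 outright; A's abstract count is 0 too
    have hB0 : maximize_tasks_alt tl m = 0 := by
      unfold maximize_tasks_alt
      rw [if_pos hk]
    rw [hB0]
    rw [PySem.List.len_eq] at hk
    by_cases hm0 : m ≤ 0
    · have : m.toNat = 0 := by omega
      rw [this]
      simp [pvAbs_nil_env]
    · have hn0 : tl.length = 0 := by omega
      have : tl = [] := List.length_eq_zero_iff.mp hn0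
      subst this
      rw [show PySem.List.sorted ([] : List (Int × Int)) (fun x => x.2) false = [] from
        (PySem.List.sorted_eq_nil_iff _ _ _).mpr rfl]
      simp [pvAbs]
  · have hk1 : 1 ≤ min (PySem.List.len tl) m := by omega
    rw [PySem.List.len_eq] at hk1
    have hn1 : 1 ≤ (tl.length : Int) := le_trans hk1 (min_le_left _ _)
    have hm1 : 1 ≤ m := le_trans hk1 (min_le_right _ _)
    have hknat : 1 ≤ (min ((tl.length : Int)) m).toNat := by omega
    have hbuild := pvBuild_spec (min ((tl.length : Int)) m).toNat hknat
    have hB := pvB_abs (PySem.List.sorted tl (fun x => x.2) false)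
      (pvBuild (min ((tl.length : Int)) m).toNat) 0 hbuild.1
    have hBval : maximize_tasks_alt tl m =
        (pvAbs (PySem.List.sorted tl (fun x => x.2) false)
          (List.replicate (min ((tl.length : Int)) m).toNat pvFREE) 0).2 := by
      unfold maximize_tasks_alt
      rw [if_neg hk]
      rw [← hbuild.2]
      exact hB.2.2
    rw [hBval]
    by_cases hmn : m ≤ (tl.length : Int)
    · rw [min_eq_right hmn]
    · rw [min_eq_left (by omega : ((tl.length : Int)) ≤ m)]
      have htr := pvTrunc (PySem.List.sorted tl (fun x => x.2) false) [] m.toNat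
        ((tl.length : Int)).toNat 0 hsts (by simp)
        (by rw [hlen_st]; omega) (by rw [hlen_st]; omega)
      simpa using htr
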